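-- pv_equiv track=rewrite | github.com/parsi2/Search_Engine | scratch.py | merge_indices
-- ===== SOURCE A (Python) =====
-- def merge_indices(list_o_indices):
--     result_dict = {}
--     for i in list_o_indices:
--         for toke in i:
--             if toke in result_dict:
--                 result_dict[toke] = result_dict[toke] | i[toke]
--             else:
--                 result_dict[toke] = i[toke]
--     return result_dict
-- ===== SOURCE B (Python) =====
-- def merge_indices(list_o_indices):
--     # Two-phase: gather all tokens (first-occurrence order), then union per token.
--     tokens = {t: None for d in list_o_indices for t in d}
--     return {t: set().union(*(d[t] for d in list_o_indices if t in d))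
--             for t in tokens}
-- ===== Notes on version B (the rewrite author's own statement) =====
-- stated objective: alternative
-- what changed: Replaces the single accumulating dict-by-dict merge with a two-phase gather-then-aggregate pass: first collect the set of all tokens in first-occurrence order, then build the result as one dict comprehension whose value per token is a single set().union over the entries of every dict containing it (always a fresh set, so no aliasing of input sets).
import Mathlib
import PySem

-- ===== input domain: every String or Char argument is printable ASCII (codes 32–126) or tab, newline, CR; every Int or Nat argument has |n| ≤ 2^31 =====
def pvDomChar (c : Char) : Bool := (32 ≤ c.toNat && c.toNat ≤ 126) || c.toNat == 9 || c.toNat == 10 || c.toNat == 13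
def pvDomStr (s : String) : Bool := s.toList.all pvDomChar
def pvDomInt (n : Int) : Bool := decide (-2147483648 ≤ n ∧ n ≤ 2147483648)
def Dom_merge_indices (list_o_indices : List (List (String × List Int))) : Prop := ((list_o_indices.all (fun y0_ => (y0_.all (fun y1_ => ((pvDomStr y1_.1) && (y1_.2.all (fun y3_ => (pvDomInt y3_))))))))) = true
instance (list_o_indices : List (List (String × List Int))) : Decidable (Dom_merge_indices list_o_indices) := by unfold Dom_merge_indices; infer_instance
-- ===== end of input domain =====

-- B replaces A's accumulating dict-by-dict merge by a gather-tokens-then-union-per-token pass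
-- (alternative decomposition, same values; B builds fresh value sets instead of aliasing input sets).


-- ===== PORT A =====
-- result_dict is a PySem.Dict; the inner 'for toke in i' iterates i's (key, value)
-- pairs directly — exact because Pre_ gives each inner dict distinct keys, so
-- toke ↦ i[toke] is exactly p.1 ↦ p.2.
def merge_indices (list_o_indices : List (List (String × List Int))) : List (String × List Int) :=
  (list_o_indices.foldl
    (fun (result_dict : PySem.Dict String (List Int)) i =>
      i.foldl
        (fun result_dict p =>
          if result_dict.contains p.1 then
            result_dict.insert p.1 (PySem.Set.union (result_dict.getD p.1 []) p.2)
          else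
            result_dict.insert p.1 p.2)
        result_dict)
    PySem.Dict.empty).items

-- ===== PORT B =====
-- tokens = {t: None for d in L for t in d} → ordered dedup of all keys;
-- set().union(*(d[t] for d in L if t in d)) → fold Set.update over the dicts containing t.
def merge_indices_alt (list_o_indices : List (List (String × List Int))) : List (String × List Int) :=
  let tokens := PySem.List.dedup (list_o_indices.flatMap (fun d => d.map Prod.fst))
  tokens.map (fun t =>
    (t, (list_o_indices.filter (fun d => (PySem.Dict.mk d).contains t)).foldl
          (fun acc d => PySem.Set.update acc ((PySem.Dict.mk d).getD t []))
          PySem.Set.empty))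

-- ===== PRECONDITION & SPEC =====
-- Pre_ restricts to the valid encodings of a Python list[dict[str, set[int]]]: each inner
-- association list has pairwise-distinct keys and each value list pairwise-distinct elements
-- (a Python dict cannot carry duplicate keys, nor a set duplicate elements, so every input the
-- Python A accepts is admitted; no input with a Python counterpart is excluded).
def Pre_merge_indices (list_o_indices : List (List (String × List Int))) : Prop :=
  (∀ d ∈ list_o_indices, (d.map Prod.fst).Nodup) ∧
  (∀ d ∈ list_o_indices, ∀ p ∈ d, p.2.Nodup)
instance (list_o_indices : List (List (String × List Int))) : Decidable (Pre_merge_indices list_o_indices) := by unfold Pre_merge_indices; infer_instance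

def pvWitness_merge_indices : (List (List (String × List Int))) :=
  [[("a", [1, 2])], [("a", [2, 3]), ("b", [])]]

def Spec_merge_indices (list_o_indices : List (List (String × List Int))) (out : List (String × List Int)) : Prop := out = merge_indices_alt list_o_indices
instance (list_o_indices : List (List (String × List Int))) (out : List (String × List Int)) : Decidable (Spec_merge_indices list_o_indices out) := by unfold Spec_merge_indices; infer_instance

-- ===== CLAIM (what is proved, stated in full; the proofs are below) =====
def Claim_equal_merge_indices : Prop := ∀ (list_o_indices : List (List (String × List Int))), Dom_merge_indices list_o_indices → Pre_merge_indices list_o_indices → Spec_merge_indices list_o_indices (merge_indices list_o_indices)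

-- ===== LEMMAS AND PROOFS =====

-- A's loop body on one (key, value) pair.
def pvStep (rd : PySem.Dict String (List Int)) (p : String × List Int) : PySem.Dict String (List Int) :=
  if rd.contains p.1 then rd.insert p.1 (PySem.Set.union (rd.getD p.1 []) p.2)
  else rd.insert p.1 p.2

-- the values attached to key t in a flat pair list, in order
def pvValsFor (t : String) (qs : List (String × List Int)) : List (List Int) :=
  (qs.filter (fun p => p.1 == t)).map Prod.snd

-- the merged value of key t: union of its values, left to right
def pvMval (t : String) (qs : List (String × List Int)) : List Int :=
  (pvValsFor t qs).foldl PySem.Set.update PySem.Set.empty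

-- the common normal form of both ports over the flattened pair list
def pvNform (qs : List (String × List Int)) : List (String × List Int) :=
  (PySem.List.dedup (qs.map Prod.fst)).map (fun t => (t, pvMval t qs))

theorem pv_foldl_flatten (L : List (List (String × List Int)))
    (e : PySem.Dict String (List Int)) :
    L.foldl (fun rd i => i.foldl pvStep rd) e = (L.flatMap id).foldl pvStep e := by
  induction L generalizing e with
  | nil => rfl
  | cons d L ih => simp [List.foldl_append, ih]

theorem pvMval_append (t : String) (qs : List (String × List Int)) (p : String × List Int) :
    pvMval t (qs ++ [p]) =
      if p.1 == t then PySem.Set.update (pvMval t qs) p.2 else pvMval t qs := by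
  by_cases h : p.1 == t <;>
    simp [pvMval, pvValsFor, List.filter_append, h, PySem.Set.update]

theorem pvValsFor_eq_nil (t : String) (qs : List (String × List Int))
    (h : t ∉ qs.map Prod.fst) : pvValsFor t qs = [] := by
  have : qs.filter (fun p => p.1 == t) = [] := by
    rw [List.filter_eq_nil_iff]
    intro p hp
    simp only [beq_iff_eq]
    exact fun he => h (he ▸ List.mem_map_of_mem hp)
  simp [pvValsFor, this]

theorem pvValsFor_append (t : String) (as bs : List (String × List Int)) :
    pvValsFor t (as ++ bs) = pvValsFor t as ++ pvValsFor t bs := by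
  simp [pvValsFor, List.filter_append]

theorem pv_find?_beq {α : Type} [BEq α] [LawfulBEq α] (l : List α) (a : α) (h : a ∈ l) :
    l.find? (· == a) = some a := by
  induction l with
  | nil => cases h
  | cons x xs ih =>
    rcases List.mem_cons.mp h with rfl | hx
    · simp
    · by_cases hxa : x = a
      · subst hxa; simp
      · simp [beq_iff_eq, hxa, ih hx]

-- items of a dict whose items are a keyed map: contains and getD read off the key list
theorem pv_contains_map (K : List String) (f : String → List Int) (k : String) :
    (PySem.Dict.mk (K.map (fun t => (t, f t)))).contains k = decide (k ∈ K) := by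
  induction K with
  | nil => rfl
  | cons x K ih =>
    by_cases hx : x = k
    · subst hx; simp [PySem.Dict.contains]
    · simp only [PySem.Dict.contains, List.map_cons, List.any_cons] at ih ⊢
      rw [ih]
      simp [List.mem_cons, hx, Ne.symm hx]

theorem pv_getD_map (K : List String) (f : String → List Int) (k : String) (h : k ∈ K) :
    (PySem.Dict.mk (K.map (fun t => (t, f t)))).getD k [] = f k := by
  simp [PySem.Dict.getD, PySem.Dict.get?, List.find?_map, Function.comp_def,
    pv_find?_beq K k h]

theorem pvA_eq_nform (qs : List (String × List Int))
    (hv : ∀ p ∈ qs, p.2.Nodup) :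
    (qs.foldl pvStep PySem.Dict.empty).items = pvNform qs := by
  induction qs using List.reverseRecOn with
  | nil => rfl
  | append_singleton qs p ih =>
    have ihh := ih (fun q hq => hv q (List.mem_append_left _ hq))
    rw [List.foldl_append, List.foldl_cons, List.foldl_nil]
    set K := PySem.List.dedup (qs.map Prod.fst) with hK
    have hD : qs.foldl pvStep PySem.Dict.empty =
        PySem.Dict.mk (K.map (fun t => (t, pvMval t qs))) := by
      cases hE : qs.foldl pvStep PySem.Dict.empty with
      | mk items => rw [hE] at ihh; simpa [pvNform] using congrArg PySem.Dict.mk ihh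
    rw [hD]
    have hkeys : pvNform (qs ++ [p]) =
        (PySem.Set.add K p.1).map (fun t => (t, pvMval t (qs ++ [p]))) := by
      simp [pvNform, PySem.Set.ofList_append_singleton, hK]
    by_cases hmem : p.1 ∈ K
    · -- key already present: overwrite with the union
      have hmem' : p.1 ∈ qs.map Prod.fst := (PySem.List.mem_dedup _ _).mp hmem
      rw [pvStep, pv_contains_map]
      simp only [hmem, decide_true, if_true]
      rw [pv_getD_map K _ p.1 hmem]
      rw [hkeys, PySem.Set.add_of_mem hmem]
      simp only [PySem.Dict.insert, PySem.Dict.contains]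
      have hc : (K.map (fun t => (t, pvMval t qs))).any (fun q => q.1 == p.1) = true := by
        simp only [List.any_map, Function.comp_def, List.any_eq_true, beq_iff_eq]
        exact ⟨p.1, hmem, rfl⟩
      rw [if_pos hc]
      simp only [List.map_map, Function.comp_def]
      apply List.map_congr_left
      intro t _
      by_cases ht : t = p.1
      · subst ht
        simp [pvMval_append, PySem.Set.union]
      · have h1 : (t == p.1) = false := beq_eq_false_iff_ne.mpr ht
        have h2 : (p.1 == t) = false := beq_eq_false_iff_ne.mpr (Ne.symm ht)
        simp [pvMval_append, h1, h2]
    · -- new key: appended at the end with its raw value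
      have hmem' : p.1 ∉ qs.map Prod.fst := fun h => hmem ((PySem.List.mem_dedup _ _).mpr h)
      rw [pvStep, pv_contains_map]
      simp only [hmem, decide_false, Bool.false_eq_true, if_false]
      rw [hkeys, PySem.Set.add_of_not_mem hmem]
      simp only [PySem.Dict.insert, PySem.Dict.contains]
      have hc : (K.map (fun t => (t, pvMval t qs))).any (fun q => q.1 == p.1) = false := by
        simp only [List.any_map, Function.comp_def, List.any_eq_false, beq_iff_eq]
        intro t ht; exact fun he => hmem (he ▸ ht)
      rw [if_neg (by simp [hc])]
      rw [List.map_append]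
      dsimp only
      simp only [List.map_cons, List.map_nil]
      refine congrArg₂ (· ++ ·) ?_ ?_
      · apply List.map_congr_left
        intro t ht
        have htp : (p.1 == t) = false := by
          refine beq_eq_false_iff_ne.mpr (fun he => hmem' ?_)
          exact he ▸ (PySem.List.mem_dedup _ _).mp ht
        simp [pvMval_append, htp]
      · have hnil : pvMval p.1 qs = [] := by
          simp [pvMval, pvValsFor_eq_nil p.1 qs hmem']
        have hp2 : p.2.Nodup := hv p (List.mem_append_right _ (List.mem_singleton.mpr rfl))
        have hof : PySem.Set.ofList p.2 = p.2 := PySem.Set.ofList_eq_self_of_nodup _ hp2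
        simp [pvMval_append, hnil, PySem.Set.update,
          show List.foldl PySem.Set.add [] p.2 = PySem.Set.ofList p.2 from rfl, hof]

-- one inner dict with distinct keys: its key-t values are [d[t]] or []
theorem pv_vals_single (d : List (String × List Int)) (t : String)
    (hd : (d.map Prod.fst).Nodup) :
    pvValsFor t d =
      if (PySem.Dict.mk d).contains t then [(PySem.Dict.mk d).getD t []] else [] := by
  induction d with
  | nil => rfl
  | cons q d ih =>
    have hq1 : q.1 ∉ d.map Prod.fst := (List.nodup_cons.mp hd).1
    have hd' : (d.map Prod.fst).Nodup := (List.nodup_cons.mp hd).2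
    by_cases hqt : q.1 = t
    · have : pvValsFor t d = [] := pvValsFor_eq_nil t d (hqt ▸ hq1)
      simp [pvValsFor, PySem.Dict.contains, PySem.Dict.getD, PySem.Dict.get?,
        hqt] at this ⊢
      simpa [pvValsFor, hqt] using this
    · have hb : (q.1 == t) = false := beq_eq_false_iff_ne.mpr hqt
      have := ih hd'
      simp only [pvValsFor, List.filter_cons, hb, Bool.false_eq_true, if_false,
        PySem.Dict.contains, PySem.Dict.getD, PySem.Dict.get?, List.any_cons,
        List.find?_cons, Bool.false_or] at this ⊢
      exact this

theorem pvB_val (L : List (List (String × List Int))) (t : String)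
    (hk : ∀ d ∈ L, (d.map Prod.fst).Nodup) (init : List Int) :
    (L.filter (fun d => (PySem.Dict.mk d).contains t)).foldl
        (fun acc d => PySem.Set.update acc ((PySem.Dict.mk d).getD t [])) init =
      (pvValsFor t (L.flatMap id)).foldl PySem.Set.update init := by
  induction L generalizing init with
  | nil => rfl
  | cons d L ih =>
    have hd := hk d List.mem_cons_self
    have hrest := fun d' hd' => hk d' (List.mem_cons_of_mem _ hd')
    rw [List.flatMap_cons, id_eq, pvValsFor_append, List.foldl_append, List.filter_cons]
    rw [pv_vals_single d t hd]
    by_cases hc : (PySem.Dict.mk d).contains t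
    · simp only [hc, if_true, List.foldl_cons, List.foldl_nil]
      exact ih hrest _
    · simp only [hc, Bool.false_eq_true, if_false, List.foldl_nil]
      exact ih hrest init

theorem pvB_eq_nform (L : List (List (String × List Int)))
    (hk : ∀ d ∈ L, (d.map Prod.fst).Nodup) :
    merge_indices_alt L = pvNform (L.flatMap id) := by
  unfold merge_indices_alt pvNform
  have hkeys : L.flatMap (fun d => d.map Prod.fst) = (L.flatMap id).map Prod.fst := by
    simp [List.flatMap_def]
  rw [hkeys]
  apply List.map_congr_left
  intro t _
  rw [pvB_val L t hk]
  rfl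

-- ===== VERDICT (by name: the statement is the Claim_ definition above) =====
theorem merge_indices_spec : Claim_equal_merge_indices := by
  intro L _ hpre
  unfold Spec_merge_indices
  have hA : merge_indices L = ((L.flatMap id).foldl pvStep PySem.Dict.empty).items :=
    congrArg PySem.Dict.items (pv_foldl_flatten L PySem.Dict.empty)
  rw [hA, pvA_eq_nform _ (by
        intro p hp
        obtain ⟨d, hd, hpd⟩ := List.mem_flatMap.mp hp
        exact hpre.2 d hd p hpd),
      ← pvB_eq_nform _ hpre.1]
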